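-- pv_equiv track=rewrite | github.com/Helbii/data-analyze | lib.py | setdataexcel
-- ===== SOURCE A (Python) =====
-- def setdataexcel(dataName, dataBreak, dataProba, dataLoc, dataError) :
--
--     c_ras = {
--         'Nom': [],
--         'Localisation': [],
--     }
--     c_none = {
--         'Nom': [],
--         'Localisation': [],
--     }
--     c_breakdown = {
--         'Nom': [],
--         'Localisation': [],
--         'Proba%': [],
--         'Date': [],
--
--     }
--
--     c_lackdata = {
--         'Nom': [],
--         'Localisation': [],
--     }
--     # setting data for different sheet
--     for i in range(0, len(dataError)):
--
--         if dataError[i] == 'RAS':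
--             c_ras['Nom'].append(dataName[i])
--             c_ras['Localisation'].append(dataLoc[i])
--         elif dataError[i] == 'aucune':
--             c_breakdown['Nom'].append(dataName[i])
--             c_breakdown['Localisation'].append(dataLoc[i])
--             c_breakdown['Date'].append(dataBreak[i])
--             c_breakdown['Proba%'].append(dataProba[i])
--         elif dataError[i] == 'manque de donnees':
--             c_lackdata['Nom'].append(dataName[i])
--             c_lackdata['Localisation'].append(dataLoc[i])
--         else:
--             c_none['Nom'].append(dataName[i])
--             c_none['Localisation'].append(dataLoc[i])
--     return c_breakdown, c_none, c_lackdata, c_ras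
-- ===== SOURCE B (Python) =====
-- def setdataexcel(dataName, dataBreak, dataProba, dataLoc, dataError):
--     n = len(dataError)
--     idx_ras = [i for i in range(n) if dataError[i] == 'RAS']
--     idx_breakdown = [i for i in range(n) if dataError[i] == 'aucune']
--     idx_lackdata = [i for i in range(n) if dataError[i] == 'manque de donnees']
--     idx_none = [i for i in range(n)
--                 if dataError[i] not in ('RAS', 'aucune', 'manque de donnees')]
--
--     def gather(xs, idx):
--         return [xs[i] for i in idx]
--
--     c_breakdown = {
--         'Nom': gather(dataName, idx_breakdown),
--         'Localisation': gather(dataLoc, idx_breakdown),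
--         'Proba%': gather(dataProba, idx_breakdown),
--         'Date': gather(dataBreak, idx_breakdown),
--     }
--     c_none = {'Nom': gather(dataName, idx_none),
--               'Localisation': gather(dataLoc, idx_none)}
--     c_lackdata = {'Nom': gather(dataName, idx_lackdata),
--                   'Localisation': gather(dataLoc, idx_lackdata)}
--     c_ras = {'Nom': gather(dataName, idx_ras),
--              'Localisation': gather(dataLoc, idx_ras)}
--     return c_breakdown, c_none, c_lackdata, c_ras
-- ===== Notes on version B (the rewrite author's own statement) =====
-- stated objective: alternative
-- what changed: Replaces A's single loop that appends row values into eight mutable dict columns with an index-partition phase (four filter comprehensions over range(n)) followed by gather comprehensions that build each result dict in one expression.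
import Mathlib
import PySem

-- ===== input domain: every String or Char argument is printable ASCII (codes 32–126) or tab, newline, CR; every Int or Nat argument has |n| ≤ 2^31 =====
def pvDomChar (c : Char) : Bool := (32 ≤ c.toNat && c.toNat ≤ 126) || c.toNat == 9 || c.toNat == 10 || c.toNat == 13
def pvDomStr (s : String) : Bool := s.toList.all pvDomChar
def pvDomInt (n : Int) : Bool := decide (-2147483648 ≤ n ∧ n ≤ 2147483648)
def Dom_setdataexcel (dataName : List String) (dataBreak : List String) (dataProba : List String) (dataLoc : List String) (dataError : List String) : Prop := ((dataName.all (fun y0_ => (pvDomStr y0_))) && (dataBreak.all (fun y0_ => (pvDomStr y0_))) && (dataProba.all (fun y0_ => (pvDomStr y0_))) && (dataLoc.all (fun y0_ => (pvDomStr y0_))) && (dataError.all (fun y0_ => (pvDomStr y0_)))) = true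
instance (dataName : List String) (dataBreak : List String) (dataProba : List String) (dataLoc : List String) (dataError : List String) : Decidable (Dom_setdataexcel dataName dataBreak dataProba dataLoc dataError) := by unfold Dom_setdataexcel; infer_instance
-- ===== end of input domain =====

-- B replaces A's single append-loop over eight dict columns by an index-partition
-- phase plus per-dict gather passes (alternative decomposition; equal return value).

-- shared helper: dataX[i] for an in-range i (Pre_ keeps every reached index in range;
-- the "" fallback is never used inside Pre_)
def pvGetS (xs : List String) (i : Int) : String := (PySem.List.pyGet? xs i).getD ""

-- ===== PORT A =====
-- the four dicts' columns, mutated in place by A's loop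
structure PVSt where
  rasN : List String
  rasL : List String
  bdN : List String
  bdL : List String
  bdD : List String
  bdP : List String
  lkN : List String
  lkL : List String
  noN : List String
  noL : List String
  deriving Repr

def pvStepA (dataName : List String) (dataBreak : List String) (dataProba : List String) (dataLoc : List String) (dataError : List String) (s : PVSt) (i : Int) : PVSt :=
  if pvGetS dataError i == "RAS" then
    { s with rasN := s.rasN ++ [pvGetS dataName i], rasL := s.rasL ++ [pvGetS dataLoc i] }
  else if pvGetS dataError i == "aucune" then
    { s with bdN := s.bdN ++ [pvGetS dataName i], bdL := s.bdL ++ [pvGetS dataLoc i],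
             bdD := s.bdD ++ [pvGetS dataBreak i], bdP := s.bdP ++ [pvGetS dataProba i] }
  else if pvGetS dataError i == "manque de donnees" then
    { s with lkN := s.lkN ++ [pvGetS dataName i], lkL := s.lkL ++ [pvGetS dataLoc i] }
  else
    { s with noN := s.noN ++ [pvGetS dataName i], noL := s.noL ++ [pvGetS dataLoc i] }

def setdataexcel (dataName : List String) (dataBreak : List String) (dataProba : List String) (dataLoc : List String) (dataError : List String) : (List (String × List String)) × (List (String × List String)) × (List (String × List String)) × (List (String × List String)) :=
  let s := (PySem.List.pyRange 0 (dataError.length : Int) 1).foldl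
    (pvStepA dataName dataBreak dataProba dataLoc dataError)
    ⟨[], [], [], [], [], [], [], [], [], []⟩
  ([("Nom", s.bdN), ("Localisation", s.bdL), ("Proba%", s.bdP), ("Date", s.bdD)],
   [("Nom", s.noN), ("Localisation", s.noL)],
   [("Nom", s.lkN), ("Localisation", s.lkL)],
   [("Nom", s.rasN), ("Localisation", s.rasL)])

-- ===== PORT B =====
def setdataexcel_alt (dataName : List String) (dataBreak : List String) (dataProba : List String) (dataLoc : List String) (dataError : List String) : (List (String × List String)) × (List (String × List String)) × (List (String × List String)) × (List (String × List String)) :=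
  let rng := PySem.List.pyRange 0 (dataError.length : Int) 1
  let idxRas := rng.filter (fun i => pvGetS dataError i == "RAS")
  let idxBreakdown := rng.filter (fun i => pvGetS dataError i == "aucune")
  let idxLackdata := rng.filter (fun i => pvGetS dataError i == "manque de donnees")
  let idxNone := rng.filter (fun i =>
    !(pvGetS dataError i == "RAS" || pvGetS dataError i == "aucune" ||
      pvGetS dataError i == "manque de donnees"))
  let gather := fun (xs : List String) (idx : List Int) => idx.map (pvGetS xs)
  ([("Nom", gather dataName idxBreakdown), ("Localisation", gather dataLoc idxBreakdown),
    ("Proba%", gather dataProba idxBreakdown), ("Date", gather dataBreak idxBreakdown)],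
   [("Nom", gather dataName idxNone), ("Localisation", gather dataLoc idxNone)],
   [("Nom", gather dataName idxLackdata), ("Localisation", gather dataLoc idxLackdata)],
   [("Nom", gather dataName idxRas), ("Localisation", gather dataLoc idxRas)])

-- ===== PRECONDITION & SPEC =====
-- Pre_: exactly the inputs where the Python A returns normally (no IndexError):
-- every index i reached by the loop is in range of dataName and dataLoc, and of
-- dataBreak/dataProba whenever dataError[i] == 'aucune'.
def Pre_setdataexcel (dataName : List String) (dataBreak : List String) (dataProba : List String) (dataLoc : List String) (dataError : List String) : Prop :=
  ∀ i < dataError.length, i < dataName.length ∧ i < dataLoc.length ∧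
    (dataError.getD i "" = "aucune" → i < dataBreak.length ∧ i < dataProba.length)
instance (dataName : List String) (dataBreak : List String) (dataProba : List String) (dataLoc : List String) (dataError : List String) : Decidable (Pre_setdataexcel dataName dataBreak dataProba dataLoc dataError) := by unfold Pre_setdataexcel; infer_instance

def pvWitness_setdataexcel : List String × List String × List String × List String × List String :=
  (["n1", "n2"], ["d1", "d2"], ["p1", "p2"], ["l1", "l2"], ["aucune", "RAS"])

def Spec_setdataexcel (dataName : List String) (dataBreak : List String) (dataProba : List String) (dataLoc : List String) (dataError : List String) (out : (List (String × List String)) × (List (String × List String)) × (List (String × List String)) × (List (String × List String))) : Prop := out = setdataexcel_alt dataName dataBreak dataProba dataLoc dataError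
instance (dataName : List String) (dataBreak : List String) (dataProba : List String) (dataLoc : List String) (dataError : List String) (out : (List (String × List String)) × (List (String × List String)) × (List (String × List String)) × (List (String × List String))) : Decidable (Spec_setdataexcel dataName dataBreak dataProba dataLoc dataError out) := by unfold Spec_setdataexcel; infer_instance

-- ===== CLAIM (what is proved, stated in full; the proofs are below) =====
def Claim_equal_setdataexcel : Prop := ∀ (dataName : List String) (dataBreak : List String) (dataProba : List String) (dataLoc : List String) (dataError : List String), Dom_setdataexcel dataName dataBreak dataProba dataLoc dataError → Pre_setdataexcel dataName dataBreak dataProba dataLoc dataError → Spec_setdataexcel dataName dataBreak dataProba dataLoc dataError (setdataexcel dataName dataBreak dataProba dataLoc dataError)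

-- ===== LEMMAS AND PROOFS =====

-- A's loop over any index list l, from any starting state s, appends exactly the
-- gathered values of the filtered indices to each column.
theorem pvFoldA_eq (dataName dataBreak dataProba dataLoc dataError : List String)
    (l : List Int) (s : PVSt) :
    l.foldl (pvStepA dataName dataBreak dataProba dataLoc dataError) s =
      { rasN := s.rasN ++ (l.filter (fun i => pvGetS dataError i == "RAS")).map (pvGetS dataName),
        rasL := s.rasL ++ (l.filter (fun i => pvGetS dataError i == "RAS")).map (pvGetS dataLoc),
        bdN := s.bdN ++ (l.filter (fun i => pvGetS dataError i == "aucune")).map (pvGetS dataName),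
        bdL := s.bdL ++ (l.filter (fun i => pvGetS dataError i == "aucune")).map (pvGetS dataLoc),
        bdD := s.bdD ++ (l.filter (fun i => pvGetS dataError i == "aucune")).map (pvGetS dataBreak),
        bdP := s.bdP ++ (l.filter (fun i => pvGetS dataError i == "aucune")).map (pvGetS dataProba),
        lkN := s.lkN ++ (l.filter (fun i => pvGetS dataError i == "manque de donnees")).map (pvGetS dataName),
        lkL := s.lkL ++ (l.filter (fun i => pvGetS dataError i == "manque de donnees")).map (pvGetS dataLoc),
        noN := s.noN ++ (l.filter (fun i =>
          !(pvGetS dataError i == "RAS" || pvGetS dataError i == "aucune" ||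
            pvGetS dataError i == "manque de donnees"))).map (pvGetS dataName),
        noL := s.noL ++ (l.filter (fun i =>
          !(pvGetS dataError i == "RAS" || pvGetS dataError i == "aucune" ||
            pvGetS dataError i == "manque de donnees"))).map (pvGetS dataLoc) } := by
  induction l generalizing s with
  | nil => simp [List.filter]
  | cons a t ih =>
      simp only [List.foldl_cons, ih]
      unfold pvStepA
      by_cases h1 : pvGetS dataError a = "RAS"
      · simp [h1]
      · by_cases h2 : pvGetS dataError a = "aucune"
        · simp [h2]
        · by_cases h3 : pvGetS dataError a = "manque de donnees"
          · simp [h3]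
          · simp [h1, h2, h3]

-- ===== VERDICT (by name: the statement is the Claim_ definition above) =====
theorem setdataexcel_spec : Claim_equal_setdataexcel := by
  intro dataName dataBreak dataProba dataLoc dataError _ _
  unfold Spec_setdataexcel setdataexcel setdataexcel_alt
  simp only [pvFoldA_eq]
  simp
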